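-- pv_equiv track=rewrite | github.com/Into-The-Grey/Vega2.0 | tools/engine/spontaneous_thought_engine.py | _assess_conversation_health
-- ===== SOURCE A (Python) =====
-- from typing import Dict, List, Optional, Any, Tuple, Set
--
-- def _assess_conversation_health(qualities: List[str]) -> str:
--     """Assess overall conversation health"""
--     if not qualities:
--         return "unknown"
--
--     positive_count = sum(1 for q in qualities[:5] if q in ["excellent", "good"])
--     negative_count = sum(1 for q in qualities[:5] if q in ["negative", "ignored"])
--
--     if positive_count >= 3:
--         return "healthy"
--     elif negative_count >= 3:
--         return "strained"
--     else:
--         return "neutral"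
-- ===== SOURCE B (Python) =====
-- def _scan(qs, budget, pos, neg):
--     """Recursive single-pass scan with early exit once 3 positives are seen."""
--     if pos >= 3:
--         return "healthy"
--     if budget == 0 or not qs:
--         return "strained" if neg >= 3 else "neutral"
--     q = qs[0]
--     return _scan(qs[1:], budget - 1,
--                  pos + (1 if q in ("excellent", "good") else 0),
--                  neg + (1 if q in ("negative", "ignored") else 0))
--
-- def _assess_conversation_health(qualities):
--     """Assess overall conversation health"""
--     if not qualities:
--         return "unknown"
--     return _scan(qualities, 5, 0, 0)
-- ===== Notes on version B (the rewrite author's own statement) =====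
-- stated objective: alternative
-- what changed: Replaces A's two staged filtered sum-scans over qualities[:5] by one recursive single pass that carries both counters and returns 'healthy' early as soon as three positives are seen.
import Mathlib
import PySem

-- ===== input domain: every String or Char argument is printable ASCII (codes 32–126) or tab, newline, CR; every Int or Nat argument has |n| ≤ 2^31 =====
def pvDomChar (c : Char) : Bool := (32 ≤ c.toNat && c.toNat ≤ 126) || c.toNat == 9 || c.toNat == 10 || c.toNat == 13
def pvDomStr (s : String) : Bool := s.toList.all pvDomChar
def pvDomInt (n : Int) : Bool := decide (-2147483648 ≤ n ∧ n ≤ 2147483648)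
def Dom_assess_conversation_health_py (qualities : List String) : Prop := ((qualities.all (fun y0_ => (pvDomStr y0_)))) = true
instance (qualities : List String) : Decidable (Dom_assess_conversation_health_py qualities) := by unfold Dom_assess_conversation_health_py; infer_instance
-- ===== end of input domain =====

-- B replaces A's two staged filtered sum-scans over qualities[:5] by one recursive
-- single pass carrying both counters, exiting early once 3 positives are seen (return value only).

-- ===== PORT A =====
def assess_conversation_health_py (qualities : List String) : String :=
  if qualities = [] then "unknown"
  else
    let positive_count : Int :=
      (PySem.List.slice qualities none (some 5)).foldl
        (fun acc q => acc + (if q = "excellent" ∨ q = "good" then 1 else 0)) 0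
    let negative_count : Int :=
      (PySem.List.slice qualities none (some 5)).foldl
        (fun acc q => acc + (if q = "negative" ∨ q = "ignored" then 1 else 0)) 0
    if positive_count ≥ 3 then "healthy"
    else if negative_count ≥ 3 then "strained"
    else "neutral"

-- ===== PORT B =====
-- recursive scan helper of Source B, structural on the list
def pvScan : List String → Int → Int → Int → String
  | qs, budget, pos, neg =>
    if pos ≥ 3 then "healthy"
    else match qs with
      | [] => if neg ≥ 3 then "strained" else "neutral"
      | q :: rest =>
        if budget = 0 then (if neg ≥ 3 then "strained" else "neutral")
        else pvScan rest (budget - 1)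
               (pos + (if q = "excellent" ∨ q = "good" then 1 else 0))
               (neg + (if q = "negative" ∨ q = "ignored" then 1 else 0))

def assess_conversation_health_py_alt (qualities : List String) : String :=
  if qualities = [] then "unknown"
  else pvScan qualities 5 0 0

-- ===== PRECONDITION & SPEC =====
def Spec_assess_conversation_health_py (qualities : List String) (out : String) : Prop := out = assess_conversation_health_py_alt qualities
instance (qualities : List String) (out : String) : Decidable (Spec_assess_conversation_health_py qualities out) := by unfold Spec_assess_conversation_health_py; infer_instance

-- ===== CLAIM (what is proved, stated in full; the proofs are below) =====
def Claim_equal_assess_conversation_health_py : Prop := ∀ (qualities : List String), Dom_assess_conversation_health_py qualities → Spec_assess_conversation_health_py qualities (assess_conversation_health_py qualities)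

-- ===== LEMMAS AND PROOFS =====
-- A's 0/1-indicator fold over two distinct target strings equals the sum of the two counts.
lemma foldl_ind_eq_counts (a b : String) (hab : a ≠ b) (t : List String) (acc : Int) :
    t.foldl (fun acc q => acc + (if q = a ∨ q = b then (1:Int) else 0)) acc
      = acc + t.count a + t.count b := by
  induction t generalizing acc with
  | nil => simp
  | cons x t ih =>
    simp only [List.foldl_cons, ih, List.count_cons]
    by_cases hx : x = a <;> by_cases hy : x = b
    · exact absurd (hx.symm.trans hy) hab
    all_goals simp [hx, hy, hab, Ne.symm hab] <;> omega

-- the scan computes the same verdict as the counts over the first `budget` elements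
set_option maxRecDepth 4000 in
lemma pvScan_eq (qs : List String) (b pos neg : Int) (hb : 0 ≤ b) :
    pvScan qs b pos neg =
      if pos + ((qs.take b.toNat).count "excellent" : Int) + (qs.take b.toNat).count "good" ≥ 3 then "healthy"
      else if neg + ((qs.take b.toNat).count "negative" : Int) + (qs.take b.toNat).count "ignored" ≥ 3 then "strained"
      else "neutral" := by
  induction qs generalizing b pos neg with
  | nil =>
    rw [pvScan]
    simp only [List.take_nil, List.count_nil]
    by_cases h : pos ≥ 3 <;> simp [h]
  | cons q rest ih =>
    rw [pvScan]
    by_cases hp : pos ≥ 3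
    · have h1 : pos + ((((q :: rest).take b.toNat).count "excellent" : Nat) : Int) + (((q :: rest).take b.toNat).count "good" : Nat) ≥ 3 := by
        have := Int.natCast_nonneg (((q :: rest).take b.toNat).count "excellent")
        have := Int.natCast_nonneg (((q :: rest).take b.toNat).count "good")
        omega
      simp [hp, h1]
    · simp only [hp, if_false]
      by_cases hb0 : b = 0
      · simp [hb0, hp]
      · have hbt : b.toNat = (b - 1).toNat + 1 := by omega
        simp only [hb0, if_false, hbt, List.take_succ_cons, List.count_cons]
        rw [ih _ _ _ (by omega)]
        refine if_congr ?_ rfl (if_congr ?_ rfl rfl) <;>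
          (push_cast
           split_ifs <;> first
             | omega
             | (exfalso; simp_all))

-- ===== VERDICT (by name: the statement is the Claim_ definition above) =====
theorem assess_conversation_health_py_spec : Claim_equal_assess_conversation_health_py := by
  intro qualities _
  unfold Spec_assess_conversation_health_py assess_conversation_health_py assess_conversation_health_py_alt
  by_cases h : qualities = []
  · simp [h]
  · simp only [h, if_false]
    rw [pvScan_eq qualities 5 0 0 (by norm_num),
        foldl_ind_eq_counts "excellent" "good" (by decide),
        foldl_ind_eq_counts "negative" "ignored" (by decide)]
    have hsl : PySem.List.slice qualities none (some 5) = qualities.take 5 := by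
      have := PySem.List.slice_to_natCast qualities 5
      simpa using this
    rw [hsl]
    have h5 : (5:Int).toNat = 5 := rfl
    rw [h5]
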